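-- pv_equiv track=rewrite | github.com/BioPack-team/shepherd | example_score/worker.py | get_next_operation
-- ===== SOURCE A (Python) =====
-- from typing import List, Dict
--
-- def get_next_operation(current_op: str, workflow: List[Dict[str, str]]):
--     """
--     Get the next workflow operation from the list.
--
--     Args:
--         current_op (string): operation of the current worker
--         workflow (List[Dict[str, str]]): TRAPI workflow operation list
--     """
--     next_op_index = -1
--     for index, operation in enumerate(workflow):
--         if operation["id"] == current_op:
--             next_op_index = index + 1
--     if next_op_index == -1 or next_op_index >= len(workflow):
--         return None
--     return workflow[next_op_index]
-- ===== SOURCE B (Python) =====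
-- def get_next_operation(current_op, workflow):
--     """Search backwards: the first match found from the end is the last match,
--     so we can return immediately instead of scanning the whole list."""
--     i = len(workflow) - 1
--     while i >= 0:
--         if workflow[i]["id"] == current_op:
--             j = i + 1
--             return workflow[j] if j < len(workflow) else None
--         i -= 1
--     return None
-- ===== Notes on version B (the rewrite author's own statement) =====
-- stated objective: idiomatic
-- what changed: B scans the workflow backwards and returns at the first match found (which is the last match), instead of scanning the whole list forward while overwriting a tracked index.
import Mathlib
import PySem

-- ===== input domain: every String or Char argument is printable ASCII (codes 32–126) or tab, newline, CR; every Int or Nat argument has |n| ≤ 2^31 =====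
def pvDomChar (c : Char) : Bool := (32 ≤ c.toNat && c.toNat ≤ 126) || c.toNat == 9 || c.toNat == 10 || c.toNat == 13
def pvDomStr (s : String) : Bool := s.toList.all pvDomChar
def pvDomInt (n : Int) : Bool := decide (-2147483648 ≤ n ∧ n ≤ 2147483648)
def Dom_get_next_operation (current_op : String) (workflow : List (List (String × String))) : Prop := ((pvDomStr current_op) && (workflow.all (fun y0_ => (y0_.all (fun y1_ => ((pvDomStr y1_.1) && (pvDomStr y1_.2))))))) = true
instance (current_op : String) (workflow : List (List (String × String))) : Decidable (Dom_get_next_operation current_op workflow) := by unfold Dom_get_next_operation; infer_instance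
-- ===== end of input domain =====

-- B scans the workflow backwards and returns at the first match found (= the last match), instead of
-- scanning the whole list forward while overwriting a tracked index (idiomatic; same asymptotic cost).

-- ===== PORT A =====
-- forward scan tracking the index after the last match (next_op_index starts at -1)
def get_next_operation (current_op : String) (workflow : List (List (String × String))) : Option (List (String × String)) :=
  let next_op_index : Int :=
    (PySem.List.enumerate workflow 0).foldl
      (fun acc p =>
        match List.lookup "id" p.2 with
        | some v => if v == current_op then p.1 + 1 else acc
        | none => acc)   -- Python raises KeyError here; excluded by Pre_
      (-1)
  if next_op_index = -1 ∨ (workflow.length : Int) ≤ next_op_index then none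
  else PySem.List.pyGet? workflow next_op_index

-- ===== PORT B =====
-- descending while-loop: fuel k means current index is k-1; returns on the first (highest-index) match
def get_next_operation_altLoop (current_op : String) (workflow : List (List (String × String))) :
    Nat → Option (List (String × String))
  | 0 => none
  | k + 1 =>
    match workflow[k]? with
    | some op =>
      match List.lookup "id" op with
      | some v =>
        if v == current_op then
          (if k + 1 < workflow.length then workflow[k + 1]? else none)
        else get_next_operation_altLoop current_op workflow k
      | none => get_next_operation_altLoop current_op workflow k   -- KeyError in Python; excluded by Pre_
    | none => get_next_operation_altLoop current_op workflow k

def get_next_operation_alt (current_op : String) (workflow : List (List (String × String))) : Option (List (String × String)) :=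
  get_next_operation_altLoop current_op workflow workflow.length

-- ===== PRECONDITION & SPEC =====
-- Pre_ excludes exactly the inputs on which Python A raises KeyError: some operation dict lacks the "id" key.
def Pre_get_next_operation (current_op : String) (workflow : List (List (String × String))) : Prop :=
  ∀ op ∈ workflow, (List.lookup "id" op).isSome = true
instance (current_op : String) (workflow : List (List (String × String))) : Decidable (Pre_get_next_operation current_op workflow) := by unfold Pre_get_next_operation; infer_instance

def pvWitness_get_next_operation : String × (List (List (String × String))) :=
  ("lookup", [[("id", "annotate")], [("id", "lookup")], [("id", "score")]])

def Spec_get_next_operation (current_op : String) (workflow : List (List (String × String))) (out : Option (List (String × String))) : Prop := out = get_next_operation_alt current_op workflow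
instance (current_op : String) (workflow : List (List (String × String))) (out : Option (List (String × String))) : Decidable (Spec_get_next_operation current_op workflow out) := by unfold Spec_get_next_operation; infer_instance

-- ===== CLAIM (what is proved, stated in full; the proofs are below) =====
def Claim_equal_get_next_operation : Prop := ∀ (current_op : String) (workflow : List (List (String × String))), Dom_get_next_operation current_op workflow → Pre_get_next_operation current_op workflow → Spec_get_next_operation current_op workflow (get_next_operation current_op workflow)

-- ===== LEMMAS AND PROOFS =====

-- does the operation at index k match?
def pvMatchAt (c : String) (w : List (List (String × String))) (k : Nat) : Bool :=
  match w[k]? with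
  | some op => match List.lookup "id" op with
    | some v => v == c
    | none => false
  | none => false

-- last matching index among indices < k
def pvLastMatch (c : String) (w : List (List (String × String))) : Nat → Option Nat
  | 0 => none
  | k + 1 => if pvMatchAt c w k then some k else pvLastMatch c w k

lemma pvLastMatch_lt (c : String) (w : List (List (String × String))) (k i : Nat)
    (h : pvLastMatch c w k = some i) : i < k := by
  induction k with
  | zero => simp [pvLastMatch] at h
  | succ k ih =>
    simp only [pvLastMatch] at h
    split at h
    · injection h with h; omega
    · exact Nat.lt_succ_of_lt (ih h)

lemma pvStep (c : String) (w : List (List (String × String))) (k : Nat)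
    (o : Option (List (String × String)))
    (ih : get_next_operation_altLoop c w k = (pvLastMatch c w k).bind (fun i => if i + 1 < w.length then w[i + 1]? else none)) :
    (match o with
      | some op =>
        match List.lookup "id" op with
        | some v => if v == c then (if k + 1 < w.length then w[k + 1]? else none) else get_next_operation_altLoop c w k
        | none => get_next_operation_altLoop c w k
      | none => get_next_operation_altLoop c w k)
    = (if (match o with
          | some op => match List.lookup "id" op with
            | some v => v == c
            | none => false
          | none => false) = true then some k else pvLastMatch c w k).bind
        (fun i => if i + 1 < w.length then w[i + 1]? else none) := by
  cases o with
  | none => simp [ih]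
  | some op =>
    cases hl : List.lookup "id" op with
    | none => simp [hl, ih]
    | some v =>
      by_cases hv : v == c
      · simp [hl, hv]
      · simp [hl, hv, ih]

lemma altLoop_eq (c : String) (w : List (List (String × String))) (k : Nat) :
    get_next_operation_altLoop c w k =
      (pvLastMatch c w k).bind (fun i => if i + 1 < w.length then w[i + 1]? else none) := by
  induction k with
  | zero => simp [get_next_operation_altLoop, pvLastMatch]
  | succ k ih =>
    simp only [get_next_operation_altLoop, pvLastMatch, pvMatchAt]
    exact pvStep c w k w[k]? ih

lemma pvMatchAt_append_left (c : String) (w : List (List (String × String)))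
    (d : List (String × String)) (k : Nat) (hk : k < w.length) :
    pvMatchAt c (w ++ [d]) k = pvMatchAt c w k := by
  simp [pvMatchAt, List.getElem?_append_left hk]

lemma pvLastMatch_append (c : String) (w : List (List (String × String)))
    (d : List (String × String)) (k : Nat) (hk : k ≤ w.length) :
    pvLastMatch c (w ++ [d]) k = pvLastMatch c w k := by
  induction k with
  | zero => rfl
  | succ k ih =>
    simp only [pvLastMatch, pvMatchAt_append_left c w d k (by omega), ih (by omega)]

def pvIntOf : Option Nat → Int
  | none => -1
  | some i => (i : Int) + 1

lemma fold_eq (c : String) (w : List (List (String × String))) :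
    (PySem.List.enumerate w 0).foldl
      (fun acc p =>
        match List.lookup "id" p.2 with
        | some v => if v == c then p.1 + 1 else acc
        | none => acc)
      (-1) = pvIntOf (pvLastMatch c w w.length) := by
  induction w using List.reverseRecOn with
  | nil => simp [pvLastMatch, pvIntOf]
  | append_singleton w d ih =>
    rw [PySem.List.enumerate_append, List.foldl_append, ih]
    simp only [List.length_append, List.length_singleton]
    have hlast : pvLastMatch c (w ++ [d]) (w.length + 1)
        = if pvMatchAt c (w ++ [d]) w.length then some w.length
          else pvLastMatch c w w.length := by
      simp only [pvLastMatch, pvLastMatch_append c w d w.length (le_refl _)]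
    rw [hlast]
    have hget : (w ++ [d])[w.length]? = some d := by
      simp
    simp only [pvMatchAt, hget, PySem.List.enumerate, List.foldl_cons, List.foldl_nil]
    cases hl : List.lookup "id" d with
    | none => simp
    | some v =>
      by_cases hv : v == c
      · simp [hv, pvIntOf]
      · simp [hv]

lemma main_eq (c : String) (w : List (List (String × String))) :
    get_next_operation c w = get_next_operation_alt c w := by
  unfold get_next_operation get_next_operation_alt
  rw [fold_eq, altLoop_eq]
  cases hm : pvLastMatch c w w.length with
  | none => simp [pvIntOf]
  | some i =>
    have hi : i < w.length := pvLastMatch_lt c w _ _ hm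
    simp only [pvIntOf, Option.bind_some]
    by_cases hlt : i + 1 < w.length
    · have h1 : ¬ ((i : Int) + 1 = -1) := by omega
      have h2 : ¬ ((w.length : Int) ≤ (i : Int) + 1) := by omega
      rw [if_neg (by tauto), if_pos hlt]
      have : ((i : Int) + 1) = ((i + 1 : Nat) : Int) := by push_cast; ring
      rw [this, PySem.List.pyGet?_natCast]
    · have h2 : ((w.length : Int) ≤ (i : Int) + 1) := by omega
      rw [if_pos (Or.inr h2), if_neg hlt]

-- ===== VERDICT (by name: the statement is the Claim_ definition above) =====
theorem get_next_operation_spec : Claim_equal_get_next_operation := by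
  intro c w _ _
  unfold Spec_get_next_operation
  exact main_eq c w
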